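/- GENERATED by tools/mkcompositions.py from design/units.gif.tsv (unit `DGifGetExtension.COMPOSITION`) — do not edit.
   THE PROOF of the composition unit `DGifGetExtension.COMPOSITION`: the 4 segments of `DGifGetExtension` chain into its contract, by the theorem
   `Gif.Spec.DGifGetExtension.compose` (proved next to the cut assertions). -/
import Gif.Spec.Units.DGifGetExtension_COMPOSITION

/-- The segments of `DGifGetExtension` compose into its contract. -/
theorem Gif.Spec.Proved.DGifGetExtension_COMPOSITION_ok : Gif.Spec.DGifGetExtension_COMPOSITION.Statement := by
  intro Lay _hLay μ _hμ u₀ h_DGifGetExtension_P h_DGifGetExtension_1 h_DGifGetExtension_2 h_DGifGetExtension_E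
  apply Gif.Spec.DGifGetExtension.compose
  all_goals assumption
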